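-- pv_equiv track=rewrite | github.com/liambohl/local-landscapes-and-phenotypic-plasticity | calc-mutant-fitness.py | generate_mutants
-- ===== SOURCE A (Python) =====
-- def dict_add(d, x):
-- 	if x in d:
-- 		d[x] += 1
-- 	else:
-- 		d[x] = 1
--
-- def generate_mutants(genome_str, instruction_set):
-- 	# Generate list of one-step mutant genomes
-- 	mutant_dict = {}
--
-- 	for i in range(len(genome_str)):
-- 		for inst in instruction_set:
-- 			if inst != genome_str[i]:
-- 				dict_add(mutant_dict, genome_str[:i] + inst + genome_str[i + 1:])	# Point
-- 			dict_add(mutant_dict, genome_str[:i] + genome_str[i + 1:])			# Deletion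
-- 			dict_add(mutant_dict, genome_str[:i] + inst + genome_str[i:])			# Insertion
--
-- 	# Handle insertions at end of genome
-- 	for inst in instruction_set:
-- 		dict_add(mutant_dict, genome_str + inst)
--
-- 	return mutant_dict
-- ===== SOURCE B (Python) =====
-- def generate_mutants(genome_str, instruction_set):
-- 	# Zipper traversal: walk the genome carrying (prefix, current char, rest) so the
-- 	# mutant strings are assembled from the accumulators, with no indexing or slicing
-- 	# by position; counts are kept with dict.get. End-of-genome insertions fall out as
-- 	# the final state of the walk (prefix == genome).
-- 	counts = {}
-- 	def bump(m):
-- 		counts[m] = counts.get(m, 0) + 1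
-- 	prefix = ""
-- 	rest = genome_str
-- 	while rest:
-- 		c, rest = rest[0], rest[1:]
-- 		for inst in instruction_set:
-- 			if inst != c:
-- 				bump(prefix + inst + rest)      # point mutation
-- 			bump(prefix + rest)                 # deletion
-- 			bump(prefix + inst + c + rest)      # insertion before c
-- 		prefix = prefix + c
-- 	for inst in instruction_set:
-- 		bump(prefix + inst)                     # insertion at end
-- 	return counts
-- ===== Notes on version B (the rewrite author's own statement) =====
-- stated objective: alternative
-- what changed: B replaces A's index-and-slice double loop (genome_str[:i], genome_str[i+1:] recomputed from an integer index) by a zipper traversal that carries prefix/suffix accumulators along the genome and assembles each mutant from them, counting with dict.get; the end-of-genome insertions are the natural final state of the walk rather than a separate special case.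
import Mathlib
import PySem

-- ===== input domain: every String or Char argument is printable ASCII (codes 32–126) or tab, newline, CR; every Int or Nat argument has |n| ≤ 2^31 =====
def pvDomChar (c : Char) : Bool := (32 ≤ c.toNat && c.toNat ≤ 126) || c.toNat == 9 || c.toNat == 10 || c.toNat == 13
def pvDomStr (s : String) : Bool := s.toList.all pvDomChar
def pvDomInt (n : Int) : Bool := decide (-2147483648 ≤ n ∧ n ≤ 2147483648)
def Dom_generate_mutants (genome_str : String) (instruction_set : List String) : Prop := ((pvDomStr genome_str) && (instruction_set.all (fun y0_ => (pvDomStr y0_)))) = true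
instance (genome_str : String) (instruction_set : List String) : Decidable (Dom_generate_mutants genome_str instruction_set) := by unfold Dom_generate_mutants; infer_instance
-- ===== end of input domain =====

-- B replaces A's index-and-slice double loop by a zipper traversal carrying prefix/suffix
-- accumulators, with end-of-genome insertions as the walk's final state ('alternative').


-- ===== PORT A =====
-- strings are ported on the List Char side (PySem.Chars primitives); keys rebuilt with String.ofList
def dict_add (d : PySem.Dict String Int) (x : String) : PySem.Dict String Int :=
  if d.contains x then d.insert x (d.getD x 0 + 1) else d.insert x 1

def generate_mutants (genome_str : String) (instruction_set : List String) : List (String × Int) :=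
  let g := genome_str.toList
  let d1 := (PySem.List.pyRange 0 (PySem.Str.len genome_str) 1).foldl (fun d i =>
    instruction_set.foldl (fun d inst =>
      -- genome_str[i]: i ranges over 0..len-1, always in range (exact)
      let c := String.ofList [PySem.List.pyGetD g i ' ']
      let d := if inst ≠ c then
          dict_add d (String.ofList (PySem.List.slice g none (some i) ++ inst.toList ++ PySem.List.slice g (some (i+1)) none))
        else d
      let d := dict_add d (String.ofList (PySem.List.slice g none (some i) ++ PySem.List.slice g (some (i+1)) none))
      dict_add d (String.ofList (PySem.List.slice g none (some i) ++ inst.toList ++ PySem.List.slice g (some i) none))) d)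
    PySem.Dict.empty
  (instruction_set.foldl (fun d inst => dict_add d (String.ofList (g ++ inst.toList))) d1).items

-- ===== PORT B =====
def gm_bump (counts : PySem.Dict String Int) (m : String) : PySem.Dict String Int :=
  counts.insert m (counts.getD m 0 + 1)

-- the zipper walk: recursion on the remaining suffix, prefix accumulated on the left
def gm_go (instruction_set : List String) : List Char → List Char → PySem.Dict String Int → PySem.Dict String Int
  | pre, [], counts => instruction_set.foldl (fun cs inst => gm_bump cs (String.ofList (pre ++ inst.toList))) counts
  | pre, c :: rest, counts =>
      gm_go instruction_set (pre ++ [c]) rest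
        (instruction_set.foldl (fun cs inst =>
          let cs := if inst ≠ String.ofList [c] then gm_bump cs (String.ofList (pre ++ inst.toList ++ rest)) else cs
          let cs := gm_bump cs (String.ofList (pre ++ rest))
          gm_bump cs (String.ofList (pre ++ inst.toList ++ (c :: rest)))) counts)

def generate_mutants_alt (genome_str : String) (instruction_set : List String) : List (String × Int) :=
  (gm_go instruction_set [] genome_str.toList PySem.Dict.empty).items

-- ===== PRECONDITION & SPEC =====
def Spec_generate_mutants (genome_str : String) (instruction_set : List String) (out : List (String × Int)) : Prop := out = generate_mutants_alt genome_str instruction_set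
instance (genome_str : String) (instruction_set : List String) (out : List (String × Int)) : Decidable (Spec_generate_mutants genome_str instruction_set out) := by unfold Spec_generate_mutants; infer_instance

-- ===== CLAIM =====
def Claim_equal_generate_mutants : Prop := ∀ (genome_str : String) (instruction_set : List String), Dom_generate_mutants genome_str instruction_set → Spec_generate_mutants genome_str instruction_set (generate_mutants genome_str instruction_set)

-- ===== LEMMAS AND PROOFS =====
theorem dict_add_eq (d : PySem.Dict String Int) (x : String) :
    dict_add d x = gm_bump d x := by
  unfold dict_add gm_bump
  by_cases h : d.contains x = true
  · simp [h]
  · simp only [Bool.not_eq_true] at h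
    rw [if_neg (by simp [h]), PySem.Dict.getD_of_not_contains d 0 h]
    norm_num

theorem gm_loop_eq (instruction_set : List String) (g : List Char) :
    ∀ (suf pre : List Char), g = pre ++ suf → ∀ d,
    instruction_set.foldl (fun d inst => dict_add d (String.ofList (g ++ inst.toList)))
      ((PySem.List.pyRange (pre.length : Int) (g.length : Int) 1).foldl (fun d i =>
        instruction_set.foldl (fun d inst =>
          let c := String.ofList [PySem.List.pyGetD g i ' ']
          let d := if inst ≠ c then
              dict_add d (String.ofList (PySem.List.slice g none (some i) ++ inst.toList ++ PySem.List.slice g (some (i+1)) none))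
            else d
          let d := dict_add d (String.ofList (PySem.List.slice g none (some i) ++ PySem.List.slice g (some (i+1)) none))
          dict_add d (String.ofList (PySem.List.slice g none (some i) ++ inst.toList ++ PySem.List.slice g (some i) none))) d) d)
    = gm_go instruction_set pre suf d := by
  intro suf
  induction suf with
  | nil =>
    intro pre hg d
    subst hg
    rw [PySem.List.pyRange_one_eq_nil (by simp)]
    simp only [List.foldl_nil, gm_go]
    exact PySem.List.foldl_congr_mem' _ _ _ _ (fun inst _ d => by simp only [List.append_nil]; exact dict_add_eq d _)
  | cons c rest ih =>
    intro pre hg d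
    have hlt : (pre.length : Int) < (g.length : Int) := by
      subst hg; simp
    rw [PySem.List.pyRange_one_cons hlt, List.foldl_cons]
    have hcast : (pre.length : Int) + 1 = ((pre ++ [c]).length : Int) := by simp
    rw [hcast, ih (pre ++ [c]) (by simp [hg])]
    show gm_go instruction_set (pre ++ [c]) rest _ = gm_go instruction_set pre (c :: rest) d
    simp only [gm_go]
    congr 1
    apply PySem.List.foldl_congr_mem'
    intro inst _ d
    have h1 : PySem.List.slice g none (some (pre.length : Int)) = pre := by
      rw [PySem.List.slice_to_natCast, hg, List.take_left]
    have h2 : PySem.List.slice g (some (((pre ++ [c]).length : Int))) none = rest := by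
      rw [PySem.List.slice_from_natCast, show g = (pre ++ [c]) ++ rest by simp [hg]]
      exact List.drop_left
    have h3 : PySem.List.slice g (some (pre.length : Int)) none = c :: rest := by
      rw [PySem.List.slice_from_natCast, hg]
      exact List.drop_left
    have h4 : PySem.List.pyGetD g (pre.length : Int) ' ' = c := by
      rw [PySem.List.pyGetD_natCast, hg, List.getD_eq_getElem?_getD, List.getElem?_append_right (le_refl _)]
      simp
    simp only [h1, h2, h3, h4, dict_add_eq]

-- ===== VERDICT =====
theorem generate_mutants_spec : Claim_equal_generate_mutants := by
  intro genome_str instruction_set _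
  unfold Spec_generate_mutants generate_mutants generate_mutants_alt
  apply congrArg PySem.Dict.items
  have h := gm_loop_eq instruction_set genome_str.toList genome_str.toList [] rfl PySem.Dict.empty
  simpa [PySem.Str.len_eq] using h
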